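-- pv_equiv track=rewrite | github.com/jjuraska/slug2slug | slot_aligner/alignment/utils.py | find_all_in_list
-- ===== SOURCE A (Python) =====
-- def find_all_in_list(val, lst):
--     indexes = []
--     positions = []
--
--     for i, elem in enumerate(lst):
--         if val == elem or val in elem.split('-') or val in elem.split('/'):
--             indexes.append(i)
--
--             # Calculate approximate character position of the matched value
--             positions.append(len(' '.join(lst[:i])))
--
--     return indexes, positions
-- ===== SOURCE B (Python) =====
-- def find_all_in_list(val, lst):
--     # Staged: build the cumulative prefix-length table once, then pair it with
--     # the elements and filter, instead of re-joining the prefix at each match.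
--     prefix = [0]
--     for e in lst:
--         prefix.append(prefix[-1] + len(e) + 1)
--     hits = [(i, max(p - 1, 0))
--             for (i, e), p in zip(enumerate(lst), prefix)
--             if val == e or val in e.split('-') or val in e.split('/')]
--     return [i for i, _ in hits], [p for _, p in hits]
-- ===== Notes on version B (the rewrite author's own statement) =====
-- stated objective: alternative
-- what changed: Replaces the per-match re-join of the whole prefix (len(' '.join(lst[:i]))) by a precomputed cumulative prefix-length table zipped with the elements and filtered in staged comprehensions.
import Mathlib
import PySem

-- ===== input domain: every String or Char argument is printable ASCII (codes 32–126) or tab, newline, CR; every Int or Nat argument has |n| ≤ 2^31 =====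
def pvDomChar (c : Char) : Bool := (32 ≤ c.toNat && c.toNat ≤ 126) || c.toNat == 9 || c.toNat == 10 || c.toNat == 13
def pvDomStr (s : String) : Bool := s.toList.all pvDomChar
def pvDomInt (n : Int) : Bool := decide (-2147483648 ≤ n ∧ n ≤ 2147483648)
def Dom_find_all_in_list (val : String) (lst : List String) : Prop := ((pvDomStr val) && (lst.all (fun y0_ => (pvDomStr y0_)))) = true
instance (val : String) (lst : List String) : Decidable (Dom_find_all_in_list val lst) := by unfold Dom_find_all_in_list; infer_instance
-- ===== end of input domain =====

-- B replaces A's per-match re-join of the whole prefix by a precomputed cumulative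
-- prefix-length table zipped with the elements and filtered (same return value everywhere).


-- ===== PORT A =====
-- the shared match condition 'val == elem or val in elem.split('-') or val in elem.split('/')'
-- (identical expression in Source A and Source B; split? is 'some' since the separator literals are nonempty)
def pvMatch (val elem : String) : Bool :=
  val == elem || ((PySem.Str.split? elem "-").getD []).contains val
             || ((PySem.Str.split? elem "/").getD []).contains val

-- A's loop body: on a match, append i and len(' '.join(lst[:i]))
def pvStepA (val : String) (lst : List String) (acc : List Int × List Int) (p : Int × String) :
    List Int × List Int :=
  if pvMatch val p.2 then
    (acc.1 ++ [p.1],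
     acc.2 ++ [PySem.Str.len (PySem.Str.join " " (PySem.List.slice lst none (some p.1)))])
  else acc

def find_all_in_list (val : String) (lst : List String) : List Int × List Int :=
  (PySem.List.enumerate lst 0).foldl (pvStepA val lst) ([], [])

-- ===== PORT B =====
-- the prefix-table loop: prefix = [0]; for e in lst: prefix.append(prefix[-1] + len(e) + 1)
-- (the accumulator list is always nonempty, so getLast?.getD 0 is exactly prefix[-1])
def pvPrefixes (lst : List String) : List Int :=
  lst.foldl (fun acc e => acc ++ [(acc.getLast?).getD 0 + PySem.Str.len e + 1]) [0]

def find_all_in_list_alt (val : String) (lst : List String) : List Int × List Int :=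
  let hits := (((PySem.List.enumerate lst 0).zip (pvPrefixes lst)).filter
      (fun q => pvMatch val q.1.2)).map (fun q => (q.1.1, max (q.2 - 1) 0))
  (hits.map (fun h => h.1), hits.map (fun h => h.2))

-- ===== PRECONDITION & SPEC =====
def Spec_find_all_in_list (val : String) (lst : List String) (out : List Int × List Int) : Prop := out = find_all_in_list_alt val lst
instance (val : String) (lst : List String) (out : List Int × List Int) : Decidable (Spec_find_all_in_list val lst out) := by unfold Spec_find_all_in_list; infer_instance

-- ===== CLAIM (what is proved, stated in full; the proofs are below) =====
def Claim_equal_find_all_in_list : Prop := ∀ (val : String) (lst : List String), Dom_find_all_in_list val lst → Spec_find_all_in_list val lst (find_all_in_list val lst)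

-- ===== LEMMAS AND PROOFS =====

-- common recursive specification both ports are reduced to
def pvG (val : String) : List String → Int → Int → List Int × List Int
  | [], _, _ => ([], [])
  | e :: r, k, t =>
      let p := pvG val r (k + 1) (t + PySem.Str.len e + 1)
      if pvMatch val e then (k :: p.1, max (t - 1) 0 :: p.2) else p

-- B's prefix-tail from a running total
def pvTail : List String → Int → List Int
  | [], _ => []
  | e :: r, t => (t + PySem.Str.len e + 1) :: pvTail r (t + PySem.Str.len e + 1)

def pvSumT (xs : List String) : Int := (xs.map (fun e => PySem.Str.len e + 1)).sum

lemma pvSumT_nonneg (xs : List String) : 0 ≤ pvSumT xs := by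
  induction xs with
  | nil => simp [pvSumT]
  | cons x r ih =>
      have := PySem.Str.len_eq x
      simp only [pvSumT, List.map_cons, List.sum_cons] at *
      omega

-- len(' '.join(parts)) = max(sum(len+1) - 1, 0)
lemma pvJoinLen (parts : List String) :
    PySem.Str.len (PySem.Str.join " " parts) = max (pvSumT parts - 1) 0 := by
  induction parts with
  | nil =>
      simp [PySem.Str.len_eq, PySem.Str.toList_join, PySem.Chars.join_nil, pvSumT]
  | cons x rest ih =>
      cases rest with
      | nil =>
          have hx := PySem.Str.len_eq x
          simp only [PySem.Str.len_eq, PySem.Str.toList_join, List.map_cons, List.map_nil,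
            PySem.Chars.join_singleton, pvSumT, List.sum_cons, List.sum_nil] at *
          omega
      | cons y r =>
          have hpos : 1 ≤ pvSumT (y :: r) := by
            have h1 := PySem.Str.len_eq y
            have h2 := pvSumT_nonneg r
            simp only [pvSumT, List.map_cons, List.sum_cons] at *
            omega
          have ih' : ((PySem.Chars.join [' '] ((y :: r).map String.toList)).length : Int)
              = pvSumT (y :: r) - 1 := by
            simp only [PySem.Str.len_eq, PySem.Str.toList_join] at ih
            rw [max_eq_left (by omega)] at ih
            rw [show " ".toList = [' '] from rfl] at ih
            exact_mod_cast ih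
          have hx := PySem.Str.len_eq x
          have hsum : pvSumT (x :: y :: r) = PySem.Str.len x + 1 + pvSumT (y :: r) := by
            simp [pvSumT]
          simp only [PySem.Str.len_eq, PySem.Str.toList_join, List.map_cons,
            PySem.Chars.join_cons_cons, List.length_append]
          rw [max_eq_left (by rw [hsum]; omega)]
          simp only [List.map_cons] at ih'
          rw [show " ".toList = [' '] from rfl, show ([' '] : List Char).length = 1 from rfl]
          push_cast
          rw [hsum]
          omega

-- A's append-based fold over the enumerated suffix equals the cons-based spec pvG
lemma pvFoldA (val : String) (lst : List String) :
    ∀ (rest : List String) (k : Nat) (idx pos : List Int),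
      lst.drop k = rest →
      (PySem.List.enumerate rest (k : Int)).foldl (pvStepA val lst) (idx, pos)
        = (idx ++ (pvG val rest (k : Int) (pvSumT (lst.take k))).1,
           pos ++ (pvG val rest (k : Int) (pvSumT (lst.take k))).2) := by
  intro rest
  induction rest with
  | nil => intro k idx pos _; simp [PySem.List.enumerate, pvG]
  | cons x r ih =>
      intro k idx pos hdrop
      have hk : k < lst.length := by
        by_contra h
        have : lst.drop k = [] := List.drop_eq_nil_of_le (by omega)
        simp [this] at hdrop
      have hget : lst[k]? = some x := by
        have h0 : (lst.drop k)[0]? = lst[k + 0]? := List.getElem?_drop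
        rw [hdrop] at h0
        simpa using h0.symm
      have htake : lst.take (k + 1) = lst.take k ++ [x] := by
        rw [List.take_add_one, hget]; rfl
      have hdrop' : lst.drop (k + 1) = r := by
        rw [← List.tail_drop, hdrop]; rfl
      have hslice : PySem.List.slice lst none (some (k : Int)) = lst.take k :=
        PySem.List.slice_to_natCast lst k
      have hcast : (k : Int) + 1 = ((k + 1 : Nat) : Int) := by push_cast; ring
      have htot : pvSumT (lst.take k) + PySem.Str.len x + 1 = pvSumT (lst.take (k + 1)) := by
        rw [htake]
        simp [pvSumT]
        ring
      rw [PySem.List.enumerate_cons]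
      simp only [List.foldl_cons]
      by_cases hm : pvMatch val x
      · simp only [pvStepA, hm, if_pos, hslice, pvJoinLen]
        rw [hcast, ih (k + 1) _ _ hdrop']
        simp only [pvG, hm, if_pos, ← hcast, ← htot]
        simp
      · simp only [pvStepA, hm, Bool.false_eq_true, if_neg, not_false_iff]
        rw [hcast, ih (k + 1) idx pos hdrop']
        simp only [pvG, hm, Bool.false_eq_true, if_neg, not_false_iff, ← hcast, ← htot]

-- the prefix-table fold appends pvTail to any nonempty accumulator ending in t
lemma pvPrefix_fold (xs : List String) :
    ∀ (acc : List Int) (t : Int), (acc.getLast?).getD 0 = t →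
      xs.foldl (fun acc e => acc ++ [(acc.getLast?).getD 0 + PySem.Str.len e + 1]) acc
        = acc ++ pvTail xs t := by
  induction xs with
  | nil => intro acc t _; simp [pvTail]
  | cons x r ih =>
      intro acc t hlast
      simp only [List.foldl_cons, pvTail]
      rw [hlast, ih (acc ++ [t + PySem.Str.len x + 1]) (t + PySem.Str.len x + 1) (by simp)]
      simp

lemma pvPrefixes_eq (lst : List String) : pvPrefixes lst = 0 :: pvTail lst 0 := by
  unfold pvPrefixes
  rw [pvPrefix_fold lst [0] 0 (by simp)]
  simp

-- B's zip/filter/map pipeline over the enumerated suffix equals pvG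
lemma pvPipeB (val : String) :
    ∀ (rest : List String) (k t : Int),
      (((((PySem.List.enumerate rest k).zip (t :: pvTail rest t)).filter
          (fun q => pvMatch val q.1.2)).map (fun q => (q.1.1, max (q.2 - 1) 0))).map (fun h => h.1),
       ((((PySem.List.enumerate rest k).zip (t :: pvTail rest t)).filter
          (fun q => pvMatch val q.1.2)).map (fun q => (q.1.1, max (q.2 - 1) 0))).map (fun h => h.2))
        = pvG val rest k t := by
  intro rest
  induction rest with
  | nil => intro k t; simp [PySem.List.enumerate, pvG]
  | cons x r ih =>
      intro k t
      rw [PySem.List.enumerate_cons]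
      simp only [pvTail, List.zip_cons_cons, List.filter_cons]
      by_cases hm : pvMatch val x
      · simp only [hm, if_pos, List.map_cons]
        have := ih (k + 1) (t + PySem.Str.len x + 1)
        simp only [pvG, hm, if_pos]
        rw [Prod.ext_iff] at this ⊢
        simp_all
      · simp only [hm, Bool.false_eq_true, if_neg, not_false_iff]
        have := ih (k + 1) (t + PySem.Str.len x + 1)
        simp only [pvG, hm, Bool.false_eq_true, if_neg, not_false_iff]
        exact this

-- ===== VERDICT (by name: the statement is the Claim_ definition above) =====
theorem find_all_in_list_spec : Claim_equal_find_all_in_list := by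
  intro val lst _
  unfold Spec_find_all_in_list find_all_in_list find_all_in_list_alt
  rw [pvPrefixes_eq]
  have hA := pvFoldA val lst lst 0 [] [] (by simp)
  have hB := pvPipeB val lst 0 0
  simp only [Nat.cast_zero, List.take_zero, List.nil_append] at hA
  simp only [pvSumT, List.map_nil, List.sum_nil] at hA
  rw [hA, ← hB]
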